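-- pv_equiv track=rewrite | github.com/alexmilroyqq/quicks | quick_split.py | list_splitter
-- ===== SOURCE A (Python) =====
-- def list_splitter(lis, points, points_seperate_split=False):
--     out = [[]]
--     for i,e in enumerate(lis):
--         if i in points and ((i-1 in points) and points_seperate_split):
--             out.append([])
--
--         if i in points or ((i-1 in points) and points_seperate_split):
--             out.append([e])
--         else:
--             out[-1].append(e)
--     if isinstance(lis, str):
--         out = [''.join(e) for e in out]
--     return out
-- ===== SOURCE B (Python) =====
-- def list_splitter(lis, points, points_seperate_split=False):
--     out = []
--     prev = 0
--     for i in range(len(lis)):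
--         if i in points or (i - 1 in points and points_seperate_split):
--             out.append(lis[prev:i])
--             if i in points and i - 1 in points and points_seperate_split:
--                 out.append(lis[i:i])
--             prev = i
--     out.append(lis[prev:])
--     return out
-- ===== Notes on version B (the rewrite author's own statement) =====
-- stated objective: simpler
-- what changed: B builds each segment in one shot by slicing lis[prev:i] at break points (tracking only the previous cut) instead of appending elements one by one into the last sub-list, which also makes the str join special-case unnecessary.
import Mathlib
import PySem

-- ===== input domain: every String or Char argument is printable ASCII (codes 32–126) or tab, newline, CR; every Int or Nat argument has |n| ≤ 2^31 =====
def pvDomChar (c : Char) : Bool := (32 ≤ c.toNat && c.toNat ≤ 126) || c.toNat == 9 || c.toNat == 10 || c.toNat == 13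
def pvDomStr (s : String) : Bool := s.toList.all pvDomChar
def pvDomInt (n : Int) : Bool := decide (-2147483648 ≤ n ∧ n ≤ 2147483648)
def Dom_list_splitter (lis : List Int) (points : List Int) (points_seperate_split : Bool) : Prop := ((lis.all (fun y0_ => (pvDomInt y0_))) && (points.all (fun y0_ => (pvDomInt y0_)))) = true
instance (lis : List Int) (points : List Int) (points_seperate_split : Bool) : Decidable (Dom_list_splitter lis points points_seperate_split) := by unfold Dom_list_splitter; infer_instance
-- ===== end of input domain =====

-- B splits by slicing lis[prev:i] at each break point instead of appending element by
-- element into the last sub-list (objective: simpler; return value only, no mutation).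

-- ===== PORT A =====
-- out[-1].append(e) is ported as dropLast ++ [out[-1] ++ [e]] (out is never empty).
def list_splitter (lis : List Int) (points : List Int) (points_seperate_split : Bool) : List (List Int) :=
  (PySem.List.enumerate lis 0).foldl (fun out ie =>
    let i := ie.1
    let e := ie.2
    let out := if i ∈ points ∧ ((i - 1) ∈ points ∧ points_seperate_split) then out ++ [[]] else out
    if i ∈ points ∨ ((i - 1) ∈ points ∧ points_seperate_split) then out ++ [[e]]
    else out.dropLast ++ [PySem.List.pyGetD out (-1) [] ++ [e]]) [[]]
  -- isinstance(lis, str) is always False here: lis is a list of ints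

-- ===== PORT B =====
def list_splitter_alt (lis : List Int) (points : List Int) (points_seperate_split : Bool) : List (List Int) :=
  let st := (PySem.List.pyRange 0 lis.length 1).foldl (fun (st : List (List Int) × Int) i =>
    if i ∈ points ∨ ((i - 1) ∈ points ∧ points_seperate_split) then
      let out := st.1 ++ [PySem.List.slice lis (some st.2) (some i)]
      let out := if i ∈ points ∧ (i - 1) ∈ points ∧ points_seperate_split then
        out ++ [PySem.List.slice lis (some i) (some i)] else out
      (out, i)
    else st) ([], 0)
  st.1 ++ [PySem.List.slice lis (some st.2) none]

-- ===== PRECONDITION & SPEC =====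
def Spec_list_splitter (lis : List Int) (points : List Int) (points_seperate_split : Bool) (out : List (List Int)) : Prop := out = list_splitter_alt lis points points_seperate_split
instance (lis : List Int) (points : List Int) (points_seperate_split : Bool) (out : List (List Int)) : Decidable (Spec_list_splitter lis points points_seperate_split out) := by unfold Spec_list_splitter; infer_instance

-- ===== CLAIM (what is proved, stated in full; the proofs are below) =====
def Claim_equal_list_splitter : Prop := ∀ (lis : List Int) (points : List Int) (points_seperate_split : Bool), Dom_list_splitter lis points points_seperate_split → Spec_list_splitter lis points points_seperate_split (list_splitter lis points points_seperate_split)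

-- ===== LEMMAS AND PROOFS =====

-- slice extension: lis[p:s+1] = lis[p:s] ++ [lis[s]]  (p ≤ s < len)
lemma slice_snoc (lis : List Int) (p s : Nat) (hps : p ≤ s) (hs : s < lis.length) :
    PySem.List.slice lis (some (p : Int)) (some ((s : Int) + 1)) =
      PySem.List.slice lis (some (p : Int)) (some (s : Int)) ++ [lis[s]] := by
  have h1 : ((s : Int) + 1) = ((s + 1 : Nat) : Int) := by push_cast; ring
  rw [h1, PySem.List.slice_natCast, PySem.List.slice_natCast]
  rw [show s + 1 - p = (s - p) + 1 by omega, List.take_add_one]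
  have h3 : p + (s - p) = s := by omega
  have h2 : (lis.drop p)[s - p]? = some lis[s] := by
    rw [List.getElem?_drop, h3, List.getElem?_eq_getElem hs]
  simp [h2]

lemma slice_nil (lis : List Int) (s : Nat) :
    PySem.List.slice lis (some (s : Int)) (some (s : Int)) = ([] : List Int) := by
  rw [PySem.List.slice_natCast]; simp

lemma slice_single (lis : List Int) (s : Nat) (hs : s < lis.length) :
    PySem.List.slice lis (some (s : Int)) (some ((s : Int) + 1)) = [lis[s]] := by
  rw [slice_snoc lis s s (le_refl s) hs, slice_nil]; simp

-- the loop invariant: A's fold state equals B's closed segments plus the open slice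
lemma key (lis points : List Int) (pss : Bool) :
    ∀ (n s p : Nat) (segs : List (List Int)), lis.length - s = n → p ≤ s → s ≤ lis.length →
    (PySem.List.enumerate (lis.drop s) (s : Int)).foldl (fun out ie =>
      let i := ie.1
      let e := ie.2
      let out := if i ∈ points ∧ ((i - 1) ∈ points ∧ pss) then out ++ [[]] else out
      if i ∈ points ∨ ((i - 1) ∈ points ∧ pss) then out ++ [[e]]
      else out.dropLast ++ [PySem.List.pyGetD out (-1) [] ++ [e]])
      (segs ++ [PySem.List.slice lis (some (p : Int)) (some (s : Int))]) =
    (let st := (PySem.List.pyRange (s : Int) lis.length 1).foldl (fun (st : List (List Int) × Int) i =>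
      if i ∈ points ∨ ((i - 1) ∈ points ∧ pss) then
        let out := st.1 ++ [PySem.List.slice lis (some st.2) (some i)]
        let out := if i ∈ points ∧ (i - 1) ∈ points ∧ pss then
          out ++ [PySem.List.slice lis (some i) (some i)] else out
        (out, i)
      else st) (segs, (p : Int))
     st.1 ++ [PySem.List.slice lis (some st.2) none]) := by
  intro n
  induction n with
  | zero =>
    intro s p segs hn hps hsl
    have hs : s = lis.length := by omega
    subst hs
    rw [List.drop_length, PySem.List.pyRange_one_eq_nil (by simp)]
    simp only [PySem.List.enumerate_nil, List.foldl_nil]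
    rw [PySem.List.slice_from_natCast, PySem.List.slice_natCast,
        List.take_of_length_le (by simp)]
  | succ n ih =>
    intro s p segs hn hps hsl
    have hs : s < lis.length := by omega
    rw [List.drop_eq_getElem_cons hs, PySem.List.enumerate_cons,
        PySem.List.pyRange_one_cons (by exact_mod_cast hs)]
    simp only [List.foldl_cons]
    by_cases hbrk : (s : Int) ∈ points ∨ (((s : Int) - 1) ∈ points ∧ pss = true)
    · rw [if_pos hbrk, if_pos hbrk]
      by_cases hdbl : (s : Int) ∈ points ∧ (((s : Int) - 1) ∈ points ∧ pss = true)
      · rw [if_pos hdbl, if_pos hdbl]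
        have this := ih (s + 1) s
          ((segs ++ [PySem.List.slice lis (some (p : Int)) (some (s : Int))]) ++
            [PySem.List.slice lis (some (s : Int)) (some (s : Int))])
          (by omega) (by omega) (by omega)
        push_cast at this
        rw [slice_single lis s hs, slice_nil lis s] at this
        rw [slice_nil lis s]
        exact this
      · rw [if_neg hdbl, if_neg hdbl]
        have this := ih (s + 1) s
          (segs ++ [PySem.List.slice lis (some (p : Int)) (some (s : Int))])
          (by omega) (by omega) (by omega)
        push_cast at this
        rw [slice_single lis s hs] at this
        exact this
    · rw [if_neg hbrk, if_neg hbrk]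
      have hndbl : ¬((s : Int) ∈ points ∧ (((s : Int) - 1) ∈ points ∧ pss = true)) := by
        intro h; exact hbrk (Or.inl h.1)
      rw [if_neg hndbl]
      rw [List.dropLast_concat, PySem.List.pyGetD_neg_one_append_singleton]
      have this := ih (s + 1) p segs (by omega) (by omega) (by omega)
      push_cast at this
      rw [slice_snoc lis p s hps hs] at this
      exact this

-- ===== VERDICT (by name: the statement is the Claim_ definition above) =====
theorem list_splitter_spec : Claim_equal_list_splitter := by
  intro lis points pss _
  unfold Spec_list_splitter list_splitter list_splitter_alt
  have := key lis points pss lis.length 0 0 [] (by omega) (le_refl 0) (by omega)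
  simp only [List.drop_zero, Nat.cast_zero] at this
  rw [show PySem.List.slice lis (some (0 : Int)) (some (0 : Int)) = ([] : List Int) by
    rw [show ((0:Int)) = ((0:Nat):Int) by simp, PySem.List.slice_natCast]; simp] at this
  simpa using this
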